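-- pv_equiv track=rewrite | github.com/pabloschwarzenberg/grader | tema4_ej3/tema4_ej3_3a730973d4610691e89c48b5c8f4b57e.py | jerigonzo
-- ===== SOURCE A (Python) =====
-- def jerigonzo(b):
--     c=""
--     i=0
--     while i<len(b):
--        c=c+b[i]
--        if b[i]=="A" or b[i]=="E" or b[i]=="I" or b[i]=="O" or b[i]=="U" or b[i]=="a" or b[i]=="e" or b[i]=="i" or b[i]=="o" or b[i]=="u":
--            c=c+"p"+b[i]
--        i=i+1
--     return c
-- ===== SOURCE B (Python) =====
-- def jerigonzo(b):
--     for v in "AEIOUaeiou":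
--         b = b.replace(v, v + "p" + v)
--     return b
-- ===== Notes on version B (the rewrite author's own statement) =====
-- stated objective: faster
-- what changed: Replaced A's single index-driven character walk with quadratic string concatenation by ten staged whole-string str.replace passes, one per vowel (correct because each pass only expands its own vowel and never creates another vowel).
import Mathlib
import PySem

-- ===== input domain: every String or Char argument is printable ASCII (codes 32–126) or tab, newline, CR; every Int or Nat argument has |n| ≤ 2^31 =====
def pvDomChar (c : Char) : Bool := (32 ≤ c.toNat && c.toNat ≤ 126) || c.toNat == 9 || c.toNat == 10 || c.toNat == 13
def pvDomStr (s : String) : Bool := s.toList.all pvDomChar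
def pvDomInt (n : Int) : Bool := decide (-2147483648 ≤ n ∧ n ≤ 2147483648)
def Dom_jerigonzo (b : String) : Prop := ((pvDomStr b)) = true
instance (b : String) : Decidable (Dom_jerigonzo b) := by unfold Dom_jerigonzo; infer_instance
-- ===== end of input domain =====

-- B replaces A's single indexed scan with ten staged whole-string str.replace passes,
-- one per vowel; objective: alternative decomposition (correct since each pass only
-- expands its own vowel and never creates another vowel).

-- ===== PORT A =====
-- A's while loop: scan b character by character in order, appending to accumulator c;
-- after each character, if it is a vowel (the literal or-chain), also append "p"+that char.
def jerigonzoGo (c : List Char) : List Char → List Char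
  | [] => c
  | x :: rest =>
      let c1 := c ++ [x]
      let c2 := if x == 'A' || x == 'E' || x == 'I' || x == 'O' || x == 'U'
                  || x == 'a' || x == 'e' || x == 'i' || x == 'o' || x == 'u'
                then c1 ++ ['p', x] else c1
      jerigonzoGo c2 rest

def jerigonzo (b : String) : String := String.ofList (jerigonzoGo [] b.toList)

-- ===== PORT B =====
-- Source B: for v in "AEIOUaeiou": b = b.replace(v, v + "p" + v); return b
def jerigonzo_alt (b : String) : String :=
  "AEIOUaeiou".toList.foldl
    (fun s v => PySem.Str.replace s (String.ofList [v]) (String.ofList [v, 'p', v])) b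

-- ===== PRECONDITION & SPEC =====
def Spec_jerigonzo (b : String) (out : String) : Prop := out = jerigonzo_alt b
instance (b : String) (out : String) : Decidable (Spec_jerigonzo b out) := by unfold Spec_jerigonzo; infer_instance

-- ===== CLAIM (what is proved, stated in full; the proofs are below) =====
def Claim_equal_jerigonzo : Prop := ∀ (b : String), Dom_jerigonzo b → Spec_jerigonzo b (jerigonzo b)

-- ===== LEMMAS AND PROOFS =====
theorem jerigonzoGo_eq (l : List Char) (c : List Char) :
    jerigonzoGo c l = c ++ l.flatMap (fun ch =>
      if ch ∈ ['A','E','I','O','U','a','e','i','o','u'] then [ch, 'p', ch] else [ch]) := by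
  induction l generalizing c with
  | nil => simp [jerigonzoGo]
  | cons x rest ih =>
    simp only [jerigonzoGo, List.flatMap_cons, ih, List.append_assoc]
    by_cases hx : x ∈ (['A','E','I','O','U','a','e','i','o','u'] : List Char)
    · fin_cases hx <;> simp
    · simp only [List.mem_cons, List.not_mem_nil, or_false, not_or] at hx
      obtain ⟨h1,h2,h3,h4,h5,h6,h7,h8,h9,h10⟩ := hx
      simp [h1,h2,h3,h4,h5,h6,h7,h8,h9,h10]

-- replace.go with a single-character pattern is the per-character expansion
theorem replace_go_single (v : Char) (new : List Char) :
    ∀ (fuel : Nat) (l acc : List Char), l.length ≤ fuel →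
      PySem.Chars.replace.go [v] new fuel l acc
        = acc.reverse ++ l.flatMap (fun c => if c = v then new else [c]) := by
  intro fuel
  induction fuel with
  | zero =>
    intro l acc h
    have : l = [] := List.eq_nil_of_length_eq_zero (Nat.le_zero.mp h)
    subst this; simp [PySem.Chars.replace.go]
  | succ n ih =>
    intro l acc h
    cases l with
    | nil => simp [PySem.Chars.replace.go]
    | cons c t =>
      simp only [PySem.Chars.replace.go]
      by_cases hc : c = v
      · subst hc
        have hpre : List.isPrefixOf [c] (c :: t) = true := by simp [List.isPrefixOf]
        rw [if_pos hpre]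
        simp only [List.length_cons] at h
        rw [ih _ _ (by simpa using Nat.le_of_succ_le_succ h)]
        simp
      · have hpre : List.isPrefixOf [v] (c :: t) = false := by
          simp [List.isPrefixOf]; exact fun h' => hc h'.symm
        rw [if_neg (by simp [hpre])]
        simp only [List.length_cons] at h
        rw [ih _ _ (Nat.le_of_succ_le_succ h)]
        simp [hc]

theorem replace_single (v : Char) (new s : List Char) :
    PySem.Chars.replace s [v] new = s.flatMap (fun c => if c = v then new else [c]) := by
  rw [PySem.Chars.replace]
  simp only [List.isEmpty_cons, Bool.false_eq_true, if_false]
  exact replace_go_single v new s.length s [] (le_refl _)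

-- staging: folding the per-vowel expansions over a duplicate-free vowel list not
-- containing 'p' equals the one-shot expansion over membership in that list
theorem foldl_expand (V : List Char) (hV : V.Nodup) (hp : 'p' ∉ V) :
    ∀ (s : List Char),
      V.foldl (fun s v => s.flatMap (fun c => if c = v then [v, 'p', v] else [c])) s
        = s.flatMap (fun c => if c ∈ V then [c, 'p', c] else [c]) := by
  induction V with
  | nil => intro s; simp
  | cons v W ih =>
    intro s
    have hvW : v ∉ W := (List.nodup_cons.mp hV).1
    have hWnd : W.Nodup := (List.nodup_cons.mp hV).2
    have hpW : 'p' ∉ W := fun h => hp (List.mem_cons_of_mem _ h)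
    simp only [List.foldl_cons, ih hWnd hpW, List.flatMap_assoc]
    congr 1
    funext c
    by_cases hc : c = v
    · subst hc
      simp [hvW, hpW]
    · simp [hc, List.mem_cons]

-- ===== VERDICT (by name: the statement is the Claim_ definition above) =====
theorem jerigonzo_spec : Claim_equal_jerigonzo := by
  intro b _
  unfold Spec_jerigonzo jerigonzo jerigonzo_alt
  rw [jerigonzoGo_eq]
  have hfold : ∀ (s : String),
      ("AEIOUaeiou".toList.foldl
        (fun s v => PySem.Str.replace s (String.ofList [v]) (String.ofList [v, 'p', v])) s).toList
      = "AEIOUaeiou".toList.foldl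
          (fun l v => l.flatMap (fun c => if c = v then [v, 'p', v] else [c])) s.toList := by
    intro s
    simp only [show ("AEIOUaeiou".toList) = ['A','E','I','O','U','a','e','i','o','u'] from rfl]
    simp [PySem.Str.replace, replace_single]
  apply String.toList_injective
  rw [hfold]
  rw [foldl_expand _ (by decide) (by decide)]
  simp
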